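-- pv_equiv track=rewrite | github.com/jererc/madkudu_test | api/core.py | get_sessions_time
-- ===== SOURCE A (Python) =====
-- def get_sessions_time(timestamps, page_time, sort_ts=False):
--
--     def iter_times():
--         sorted_timestamps = sorted(timestamps) \
--                 if sort_ts else timestamps
--         begin = sorted_timestamps[0]
--         end = begin + page_time
--         for ts in sorted_timestamps:
--             if ts < end:
--                 end = ts + page_time
--             else:
--                 yield end - begin
--                 begin = ts
--                 end = ts + page_time
--         yield end - begin
--
--     if not timestamps:
--         return 0
--     return sum(iter_times())
-- ===== SOURCE B (Python) =====
-- def get_sessions_time(timestamps, page_time, sort_ts=False):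
--     if not timestamps:
--         return 0
--     seq = sorted(timestamps) if sort_ts else timestamps
--     gaps = [b - a for a, b in zip([seq[0]] + seq, seq)]
--     breaks = sum(1 for g in gaps if g >= page_time)
--     within = sum(g for g in gaps if g < page_time)
--     return (breaks + 1) * page_time + within
-- ===== Notes on version B (the rewrite author's own statement) =====
-- stated objective: alternative
-- what changed: Replaces the generator of per-session (end-begin) windows and its begin/end state by staged passes: build the list of consecutive gaps once, then count the gaps >= page_time (breaks) and sum the gaps < page_time (within), returning (breaks+1)*page_time + within.
import Mathlib
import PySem

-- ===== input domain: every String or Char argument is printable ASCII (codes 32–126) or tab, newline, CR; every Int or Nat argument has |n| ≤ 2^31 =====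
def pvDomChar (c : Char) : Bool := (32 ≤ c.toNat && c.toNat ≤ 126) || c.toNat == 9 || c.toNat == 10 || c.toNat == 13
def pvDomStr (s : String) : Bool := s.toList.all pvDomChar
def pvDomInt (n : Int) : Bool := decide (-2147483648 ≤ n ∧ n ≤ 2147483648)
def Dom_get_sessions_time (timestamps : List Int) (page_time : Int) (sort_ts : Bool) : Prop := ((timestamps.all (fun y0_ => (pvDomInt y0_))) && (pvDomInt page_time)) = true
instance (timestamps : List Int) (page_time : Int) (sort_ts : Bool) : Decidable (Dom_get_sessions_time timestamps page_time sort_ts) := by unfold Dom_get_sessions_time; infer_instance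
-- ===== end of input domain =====

-- B replaces A's stateful generator of session windows by staged passes over the list of
-- consecutive gaps (a break count and a within-gap sum): a different decomposition, same cost.

-- ===== PORT A =====
-- the generator loop of iter_times, summing the yields as they are produced:
-- state is (begin, end); '[]' performs the final 'yield end - begin'
def pvALoop : List Int → Int → Int → Int → Int
  | [], b, e, _ => e - b
  | ts :: rest, b, e, pt =>
      if ts < e then pvALoop rest b (ts + pt) pt
      else (e - b) + pvALoop rest ts (ts + pt) pt

def get_sessions_time (timestamps : List Int) (page_time : Int) (sort_ts : Bool) : Int :=
  if timestamps = [] then 0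
  else
    match (if sort_ts then PySem.List.sorted timestamps (fun x => x) false else timestamps) with
    | [] => 0   -- unreachable: sorted preserves length
    | t0 :: rest => pvALoop (t0 :: rest) t0 (t0 + page_time) page_time

-- ===== PORT B =====
def get_sessions_time_alt (timestamps : List Int) (page_time : Int) (sort_ts : Bool) : Int :=
  if timestamps = [] then 0
  else
    match (if sort_ts then PySem.List.sorted timestamps (fun x => x) false else timestamps) with
    | [] => 0   -- unreachable: sorted preserves length
    | t0 :: rest =>
        let seq := t0 :: rest
        let gaps := List.zipWith (fun a b => b - a) (t0 :: seq) seq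
        let breaks : Int := (gaps.countP (fun g => decide (page_time ≤ g)) : Nat)
        let within : Int := (gaps.filter (fun g => decide (g < page_time))).sum
        (breaks + 1) * page_time + within

-- ===== PRECONDITION & SPEC =====
def Spec_get_sessions_time (timestamps : List Int) (page_time : Int) (sort_ts : Bool) (out : Int) : Prop := out = get_sessions_time_alt timestamps page_time sort_ts
instance (timestamps : List Int) (page_time : Int) (sort_ts : Bool) (out : Int) : Decidable (Spec_get_sessions_time timestamps page_time sort_ts out) := by unfold Spec_get_sessions_time; infer_instance

-- ===== CLAIM =====
def Claim_equal_get_sessions_time : Prop := ∀ (timestamps : List Int) (page_time : Int) (sort_ts : Bool), Dom_get_sessions_time timestamps page_time sort_ts → Spec_get_sessions_time timestamps page_time sort_ts (get_sessions_time timestamps page_time sort_ts)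

-- ===== LEMMAS AND PROOFS =====

-- sum of min(gap, pt) over consecutive pairs: the common value of both computations
def pvSumMin : List Int → Int → Int → Int
  | [], _, _ => 0
  | ts :: rest, prev, pt => min (ts - prev) pt + pvSumMin rest ts pt

theorem pvALoop_eq (pt : Int) (l : List Int) : ∀ b prev,
    pvALoop l b (prev + pt) pt = (prev + pt - b) + pvSumMin l prev pt := by
  induction l with
  | nil => intro b prev; simp [pvALoop, pvSumMin]
  | cons ts rest ih =>
      intro b prev
      simp only [pvALoop, pvSumMin]
      by_cases h : ts < prev + pt
      · have hmin : min (ts - prev) pt = ts - prev := by omega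
        rw [if_pos h, ih b ts, hmin]; ring
      · have hmin : min (ts - prev) pt = pt := by omega
        rw [if_neg h, ih ts ts, hmin]; ring

theorem pvB_eq (pt : Int) (l : List Int) : ∀ prev,
    ((List.zipWith (fun a b => b - a) (prev :: l) l).countP (fun g => decide (pt ≤ g)) : Int) * pt
      + ((List.zipWith (fun a b => b - a) (prev :: l) l).filter (fun g => decide (g < pt))).sum
    = pvSumMin l prev pt := by
  induction l with
  | nil => intro prev; simp [pvSumMin]
  | cons ts rest ih =>
      intro prev
      simp only [List.zipWith, pvSumMin]
      by_cases h : pt ≤ ts - prev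
      · have hnlt : ¬ (ts - prev < pt) := by omega
        have hmin : min (ts - prev) pt = pt := by omega
        rw [List.countP_cons, List.filter_cons]
        simp only [h, hnlt, decide_true, decide_false, Bool.false_eq_true, if_true, if_false]
        push_cast
        rw [← ih ts, hmin]; ring
      · have hlt : ts - prev < pt := by omega
        have hmin : min (ts - prev) pt = ts - prev := by omega
        rw [List.countP_cons, List.filter_cons]
        simp only [h, hlt, decide_true, decide_false, Bool.false_eq_true, if_true, if_false,
          Nat.add_zero]
        rw [List.sum_cons, ← ih ts, hmin]; ring

-- ===== VERDICT =====
theorem get_sessions_time_spec : Claim_equal_get_sessions_time := by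
  intro timestamps page_time sort_ts _
  unfold Spec_get_sessions_time get_sessions_time get_sessions_time_alt
  by_cases he : timestamps = []
  · simp [he]
  · rw [if_neg he, if_neg he]
    cases hseq : (if sort_ts then PySem.List.sorted timestamps (fun x => x) false else timestamps) with
    | nil => rfl
    | cons t0 rest =>
        show pvALoop (t0 :: rest) t0 (t0 + page_time) page_time = _
        rw [pvALoop_eq page_time (t0 :: rest) t0 t0]
        simp only []
        rw [← pvB_eq page_time (t0 :: rest) t0]
        ring
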